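-- pv_equiv track=rewrite | github.com/domingosneto2/coronapy | sim.py | add_arrays_wp
-- ===== SOURCE A (Python) =====
-- def add_arrays_wp(a1, a2):
--     if len(a1) <= len(a2):
--         a = a1
--         b = a2
--     else:
--         a = a2
--         b = a1
--
--     c = b.copy()
--     for i in range(len(a)):
--         c[i] = a[i] + b[i]
--     if len(a) > 0:
--         for i in range(len(a), len(b)):
--             c[i] = a[len(a) - 1] + b[i]
--
--     return c
-- ===== SOURCE B (Python) =====
-- def add_arrays_wp(a1, a2):
--     if not a1:
--         return a2.copy()
--     if not a2:
--         return a1.copy()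
--     out = []
--     lx, ly = a1[0], a2[0]
--     for i in range(max(len(a1), len(a2))):
--         if i < len(a1):
--             lx = a1[i]
--         if i < len(a2):
--             ly = a2[i]
--         out.append(lx + ly)
--     return out
-- ===== Notes on version B (the rewrite author's own statement) =====
-- stated objective: alternative
-- what changed: A copies the longer list and mutates it with two staged index loops (overlap, then tail using the shorter list's last element); B never chooses a shorter/longer pair or copies anything: after dispatching the two empty cases it does one forward pass over range(max(len(a1),len(a2))) carrying last-seen-value accumulators lx, ly for each input and appending lx+ly, so the extension-by-last-value falls out of the accumulators instead of being written into a copy.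
import Mathlib
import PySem

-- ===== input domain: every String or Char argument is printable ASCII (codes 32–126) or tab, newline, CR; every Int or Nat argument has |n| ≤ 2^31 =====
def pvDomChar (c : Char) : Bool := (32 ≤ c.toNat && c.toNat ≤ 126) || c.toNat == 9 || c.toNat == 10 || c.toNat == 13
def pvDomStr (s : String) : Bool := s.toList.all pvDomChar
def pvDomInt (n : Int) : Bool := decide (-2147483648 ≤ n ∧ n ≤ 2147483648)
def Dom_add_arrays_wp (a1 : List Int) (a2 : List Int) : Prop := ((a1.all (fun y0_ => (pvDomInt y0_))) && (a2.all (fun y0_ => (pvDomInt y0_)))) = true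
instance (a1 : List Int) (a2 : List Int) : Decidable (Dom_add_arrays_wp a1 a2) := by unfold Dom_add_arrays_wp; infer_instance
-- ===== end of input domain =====

-- B replaces A's copy-the-longer-list-and-mutate-in-two-loops scheme by a single forward
-- pass carrying last-seen-value accumulators for each input (objective: alternative).

-- ===== PORT A =====
def add_arrays_wp (a1 : List Int) (a2 : List Int) : List Int :=
  let ab := if a1.length ≤ a2.length then (a1, a2) else (a2, a1)
  let a := ab.1
  let b := ab.2
  let c := b
  let c := (PySem.List.pyRange 0 a.length 1).foldl
    (fun c i => PySem.List.pySetD c i (PySem.List.pyGetD a i 0 + PySem.List.pyGetD b i 0)) c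
  if a.length > 0 then
    (PySem.List.pyRange (a.length) (b.length) 1).foldl
      (fun c i => PySem.List.pySetD c i (PySem.List.pyGetD a ((a.length : Int) - 1) 0 + PySem.List.pyGetD b i 0)) c
  else c

-- ===== PORT B =====
def add_arrays_wp_alt (a1 : List Int) (a2 : List Int) : List Int :=
  if a1 = [] then a2
  else if a2 = [] then a1
  else
    let s := (PySem.List.pyRange 0 (max a1.length a2.length) 1).foldl
      (fun (s : List Int × Int × Int) i =>
        let lx := if i < (a1.length : Int) then PySem.List.pyGetD a1 i 0 else s.2.1
        let ly := if i < (a2.length : Int) then PySem.List.pyGetD a2 i 0 else s.2.2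
        (s.1 ++ [lx + ly], lx, ly))
      ([], PySem.List.pyGetD a1 0 0, PySem.List.pyGetD a2 0 0)
    s.1

-- ===== PRECONDITION & SPEC =====
def Spec_add_arrays_wp (a1 : List Int) (a2 : List Int) (out : List Int) : Prop := out = add_arrays_wp_alt a1 a2
instance (a1 : List Int) (a2 : List Int) (out : List Int) : Decidable (Spec_add_arrays_wp a1 a2 out) := by unfold Spec_add_arrays_wp; infer_instance

-- ===== CLAIM (what is proved, stated in full; the proofs are below) =====
def Claim_equal_add_arrays_wp : Prop := ∀ (a1 : List Int) (a2 : List Int), Dom_add_arrays_wp a1 a2 → Spec_add_arrays_wp a1 a2 (add_arrays_wp a1 a2)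

-- ===== LEMMAS AND PROOFS =====

-- A loop that sets consecutive positions s, s+1, …, s+n-1 of c to w 0, …, w (n-1)
-- splices (range n).map w into c.
lemma setRangeOff (w : Nat → Int) (n : Nat) : ∀ (c : List Int) (s : Nat), s + n ≤ c.length →
    (List.range n).foldl (fun c k => c.set (s + k) (w k)) c
      = c.take s ++ (List.range n).map w ++ c.drop (s + n) := by
  induction n with
  | zero => intro c s h; simp
  | succ n ih =>
    intro c s h
    have hlt : s + n < c.length := by omega
    rw [List.range_succ, List.foldl_append, List.foldl_cons, List.foldl_nil,
        ih c s (by omega), List.map_append]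
    have hlen : (c.take s ++ (List.range n).map w).length = s + n := by
      simp [List.length_take]; omega
    rw [List.drop_eq_getElem_cons hlt, ← List.append_assoc,
        List.set_append_right _ _ (by omega), hlen, Nat.sub_self, List.set_cons_zero]
    simp
    omega

-- A's two-loop body, for the chosen (shorter, longer) pair, equals a padded-zip form.
lemma core (a b : List Int) (hab : a.length ≤ b.length) :
    (let c := b;
     let c := (PySem.List.pyRange 0 a.length 1).foldl
       (fun c i => PySem.List.pySetD c i (PySem.List.pyGetD a i 0 + PySem.List.pyGetD b i 0)) c;
     if a.length > 0 then
       (PySem.List.pyRange (a.length) (b.length) 1).foldl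
         (fun c i => PySem.List.pySetD c i (PySem.List.pyGetD a ((a.length : Int) - 1) 0 + PySem.List.pyGetD b i 0)) c
     else c)
    = (if a = [] then b
       else
         ((a ++ List.replicate (b.length - a.length) (PySem.List.pyGetD a (-1) 0)).zip b).map
           (fun p => p.1 + p.2)) := by
  have hr1 : PySem.List.pyRange 0 (a.length) 1
      = (List.range a.length).map (fun k : Nat => (k : Int)) := by
    rw [PySem.List.pyRange_one]
    simp only [sub_zero, Int.toNat_natCast, zero_add]
  have hr2 : PySem.List.pyRange (a.length) (b.length) 1
      = (List.range (b.length - a.length)).map (fun k : Nat => ((a.length : Int) + k)) := by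
    rw [PySem.List.pyRange_one,
        show ((b.length : Int) - a.length).toNat = b.length - a.length by omega]
  simp only [hr1, hr2, List.foldl_map]
  by_cases hnil : a = []
  · subst hnil; simp
  · have hpos : 0 < a.length := List.length_pos_iff.mpr hnil
    simp only [if_neg hnil, if_pos (by omega : a.length > 0)]
    -- first loop
    have hf1 : (fun (c : List Int) (k : Nat) =>
        PySem.List.pySetD c (k : Int) (PySem.List.pyGetD a (k : Int) 0 + PySem.List.pyGetD b (k : Int) 0))
        = fun c k => c.set (0 + k) (a.getD k 0 + b.getD k 0) := by
      funext c k
      simp [PySem.List.pySetD_natCast, PySem.List.pyGetD_natCast]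
    rw [hf1, setRangeOff _ _ b 0 (by omega)]
    simp only [List.take_zero, List.nil_append, Nat.zero_add]
    -- second loop
    set c1 := (List.range a.length).map (fun k => a.getD k 0 + b.getD k 0) ++ b.drop a.length
      with hc1
    have hc1len : c1.length = b.length := by
      rw [hc1]; simp; omega
    have hcast : ((a.length : Int) - 1) = ((a.length - 1 : Nat) : Int) := by omega
    have hf2 : (fun (c : List Int) (k : Nat) =>
        PySem.List.pySetD c ((a.length : Int) + k)
          (PySem.List.pyGetD a ((a.length : Int) - 1) 0 + PySem.List.pyGetD b ((a.length : Int) + k) 0))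
        = fun c k => c.set (a.length + k) (a.getD (a.length - 1) 0 + b.getD (a.length + k) 0) := by
      funext c k
      rw [hcast, show ((a.length : Int) + k) = ((a.length + k : Nat) : Int) by push_cast; ring]
      simp only [PySem.List.pySetD_natCast, PySem.List.pyGetD_natCast]
    rw [hf2, setRangeOff _ _ c1 a.length (by omega)]
    rw [show a.length + (b.length - a.length) = b.length by omega]
    have htake : c1.take a.length
        = (List.range a.length).map (fun k => a.getD k 0 + b.getD k 0) := by
      rw [hc1, List.take_append_of_le_length (by simp), List.take_of_length_le (by simp)]
    have hdropnil : c1.drop b.length = [] := by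
      rw [List.drop_eq_nil_iff, hc1len]
    rw [htake, hdropnil, List.append_nil]
    -- last element of a
    have hlast : PySem.List.pyGetD a (-1) 0 = a.getD (a.length - 1) 0 := by
      rw [PySem.List.pyGetD_neg_one a 0 hnil, List.getLast_eq_getElem,
          List.getD_eq_getElem _ _ (by omega)]
    rw [hlast]
    -- close by extensionality
    apply List.ext_getElem
    · simp; omega
    · intro i h1 h2
      have hi : i < b.length := by
        simp at h2; omega
      have hzlen : i < ((a ++ List.replicate (b.length - a.length) (a.getD (a.length - 1) 0)).zip b).length := by
        simp; omega
      rw [List.getElem_map, List.getElem_zip]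
      by_cases hia : i < a.length
      · rw [List.getElem_append_left (by simpa using hia)]
        simp [List.getElem_append_left hia, List.getD_eq_getElem?_getD,
              List.getElem?_eq_getElem hia, List.getElem?_eq_getElem hi]
      · rw [List.getElem_append_right (by simpa using hia)]
        have hig : a.length + (i - a.length) = i := by omega
        simp only [List.length_map, List.length_range, List.getElem_map, List.getElem_range, hig]
        rw [List.getElem_append_right (by omega : a.length ≤ i)]
        simp [List.getD_eq_getElem?_getD, List.getElem?_eq_getElem hi]

-- B's accumulator loop, characterised: after n steps the output is the clamped-index
-- formula over range n, and the accumulators hold the values at the clamped index n-1.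
lemma bfold (a1 a2 : List Int) (n : Nat) :
    (List.range n).foldl
      (fun (s : List Int × Int × Int) (k : Nat) =>
        let lx := if k < a1.length then a1.getD k 0 else s.2.1
        let ly := if k < a2.length then a2.getD k 0 else s.2.2
        (s.1 ++ [lx + ly], lx, ly))
      ([], a1.getD 0 0, a2.getD 0 0)
    = ((List.range n).map
         (fun i => a1.getD (min i (a1.length - 1)) 0 + a2.getD (min i (a2.length - 1)) 0),
       a1.getD (min (n - 1) (a1.length - 1)) 0,
       a2.getD (min (n - 1) (a2.length - 1)) 0) := by
  induction n with
  | zero => simp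
  | succ n ih =>
    rw [List.range_succ, List.foldl_append, List.foldl_cons, List.foldl_nil, ih,
        List.map_append]
    have e1 : (if n < a1.length then a1.getD n 0 else a1.getD (min (n - 1) (a1.length - 1)) 0)
        = a1.getD (min n (a1.length - 1)) 0 := by
      split_ifs with h
      · congr 1; omega
      · congr 1
        rcases Nat.eq_zero_or_pos a1.length with h0 | h0
        · simp [h0]
        · omega
    have e2 : (if n < a2.length then a2.getD n 0 else a2.getD (min (n - 1) (a2.length - 1)) 0)
        = a2.getD (min n (a2.length - 1)) 0 := by
      split_ifs with h
      · congr 1; omega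
      · congr 1
        rcases Nat.eq_zero_or_pos a2.length with h0 | h0
        · simp [h0]
        · omega
    simp only [e1, e2, List.map_cons, List.map_nil, Nat.add_sub_cancel]

-- the padded-zip form equals the clamped-index formula (a shorter, nonempty)
lemma zipform_eq (a b : List Int) (hab : a.length ≤ b.length) (ha : a ≠ []) :
    ((a ++ List.replicate (b.length - a.length) (PySem.List.pyGetD a (-1) 0)).zip b).map
        (fun p => p.1 + p.2)
      = (List.range b.length).map
          (fun i => a.getD (min i (a.length - 1)) 0 + b.getD (min i (b.length - 1)) 0) := by
  have hpos : 0 < a.length := List.length_pos_iff.mpr ha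
  have hlast : PySem.List.pyGetD a (-1) 0 = a.getD (a.length - 1) 0 := by
    rw [PySem.List.pyGetD_neg_one a 0 ha, List.getLast_eq_getElem,
        List.getD_eq_getElem _ _ (by omega)]
  rw [hlast]
  apply List.ext_getElem
  · simp; omega
  · intro i h1 h2
    have hi : i < b.length := by simp at h2; omega
    have hzlen : i < ((a ++ List.replicate (b.length - a.length) (a.getD (a.length - 1) 0)).zip b).length := by
      simp; omega
    rw [List.getElem_map, List.getElem_zip, List.getElem_map, List.getElem_range]
    have hb : min i (b.length - 1) = i := by omega
    rw [hb]
    by_cases hia : i < a.length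
    · have hmn : min i (a.length - 1) = i := by omega
      rw [List.getElem_append_left (by simpa using hia), hmn]
      simp [List.getD_eq_getElem?_getD, List.getElem?_eq_getElem hia,
            List.getElem?_eq_getElem hi]
    · have hmn : min i (a.length - 1) = a.length - 1 := by omega
      rw [List.getElem_append_right (by simpa using hia), hmn]
      simp [List.getD_eq_getElem?_getD, List.getElem?_eq_getElem hi]

-- B, for nonempty inputs, equals the clamped-index formula over range (max length)
lemma alt_closed (a1 a2 : List Int) (h1 : a1 ≠ []) (h2 : a2 ≠ []) :
    add_arrays_wp_alt a1 a2
      = (List.range (max a1.length a2.length)).map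
          (fun i => a1.getD (min i (a1.length - 1)) 0 + a2.getD (min i (a2.length - 1)) 0) := by
  unfold add_arrays_wp_alt
  rw [if_neg h1, if_neg h2]
  have hr : PySem.List.pyRange 0 (max a1.length a2.length) 1
      = (List.range (max a1.length a2.length)).map (fun k : Nat => (k : Int)) := by
    rw [PySem.List.pyRange_one,
        show ((max (a1.length : Int) (a2.length : Int) - 0).toNat) = max a1.length a2.length by omega]
    simp only [zero_add]
  simp only [hr, List.foldl_map]
  have hg1 : PySem.List.pyGetD a1 0 0 = a1.getD 0 0 := by
    simpa using PySem.List.pyGetD_natCast a1 0 0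
  have hg2 : PySem.List.pyGetD a2 0 0 = a2.getD 0 0 := by
    simpa using PySem.List.pyGetD_natCast a2 0 0
  have hf : (fun (s : List Int × Int × Int) (k : Nat) =>
      let lx := if (k : Int) < (a1.length : Int) then PySem.List.pyGetD a1 (k : Int) 0 else s.2.1
      let ly := if (k : Int) < (a2.length : Int) then PySem.List.pyGetD a2 (k : Int) 0 else s.2.2
      (s.1 ++ [lx + ly], lx, ly))
      = fun (s : List Int × Int × Int) (k : Nat) =>
        let lx := if k < a1.length then a1.getD k 0 else s.2.1
        let ly := if k < a2.length then a2.getD k 0 else s.2.2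
        (s.1 ++ [lx + ly], lx, ly) := by
    funext s k
    simp [PySem.List.pyGetD_natCast, Nat.cast_lt]
  rw [hg1, hg2, hf, bfold]

-- ===== VERDICT (by name: the statement is the Claim_ definition above) =====
theorem add_arrays_wp_spec : Claim_equal_add_arrays_wp := by
  intro a1 a2 _
  unfold Spec_add_arrays_wp
  by_cases h1 : a1 = []
  · subst h1
    have := core [] a2 (by simp)
    unfold add_arrays_wp add_arrays_wp_alt
    simpa using this
  · by_cases h2 : a2 = []
    · subst h2
      have hlen : ¬ a1.length ≤ ([] : List Int).length := by
        simp [Nat.pos_iff_ne_zero.mp (List.length_pos_iff.mpr h1)]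
      have := core [] a1 (by simp)
      unfold add_arrays_wp add_arrays_wp_alt
      simp only [if_neg hlen, if_neg h1]
      simpa using this
    · rw [alt_closed a1 a2 h1 h2]
      unfold add_arrays_wp
      by_cases h : a1.length ≤ a2.length
      · have hmax : max a1.length a2.length = a2.length := by omega
        rw [hmax]
        simp only [if_pos h]
        rw [core a1 a2 h, if_neg h1, zipform_eq a1 a2 h h1]
      · have hmax : max a1.length a2.length = a1.length := by omega
        rw [hmax]
        simp only [if_neg h]
        rw [core a2 a1 (by omega), if_neg h2, zipform_eq a2 a1 (by omega) h2]
        apply List.map_congr_left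
        intro i _
        ring
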